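-- pv_equiv track=rewrite | github.com/Hasan202419/us-stock-rvol-agents | agents/restore_dotenv_active.py | build_merge
-- ===== SOURCE A (Python) =====
-- from collections import defaultdict
--
-- def scratch_value_tail(tail: str) -> str:
--     return tail.split("#", 1)[0].strip().strip('"').strip("'")
--
-- def build_merge(defs: dict[str, str], actives: list[tuple[int, str, str, str]]) -> tuple[dict[str, str], set[str]]:
--     buckets: dict[str, list[str]] = defaultdict(list)
--     for _, _ind, key, tail in actives:
--         buckets[key].append(scratch_value_tail(tail))
--
--     merged: dict[str, str] = {}
--     dups: set[str] = set()
--     for key, vals in buckets.items():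
--         if len(vals) > 1:
--             dups.add(key)
--         merged[key] = next((x for x in reversed(vals) if x), "") or ""
--
--     for key, v in defs.items():
--         if not merged.get(key, "").strip() and v:
--             merged[key] = v
--
--     return merged, dups
-- ===== SOURCE B (Python) =====
-- def scratch_value_tail(tail: str) -> str:
--     return tail.split("#", 1)[0].strip().strip('"').strip("'")
--
-- def build_merge(defs: dict[str, str], actives: list[tuple[int, str, str, str]]) -> tuple[dict[str, str], set[str]]:
--     # Single pass: merge and count per key simultaneously; no grouping phase.
--     merged: dict[str, str] = {}
--     counts: dict[str, int] = {}
--     for _, _ind, key, tail in actives: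
--         v = scratch_value_tail(tail)
--         counts[key] = counts.get(key, 0) + 1
--         merged.setdefault(key, "")
--         if v:
--             merged[key] = v
--
--     dups = {k for k, c in counts.items() if c > 1}
--
--     for key, v in defs.items():
--         if not merged.get(key, "").strip() and v:
--             merged[key] = v
--
--     return merged, dups
-- ===== Notes on version B (the rewrite author's own statement) =====
-- stated objective: simpler
-- what changed: B replaces A's two-phase group-then-reduce (defaultdict of per-key value lists, then a second loop reducing each list) by a single pass that maintains a merged dict and a count dict directly, deriving the duplicate set from the counts afterwards.
import Mathlib
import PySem

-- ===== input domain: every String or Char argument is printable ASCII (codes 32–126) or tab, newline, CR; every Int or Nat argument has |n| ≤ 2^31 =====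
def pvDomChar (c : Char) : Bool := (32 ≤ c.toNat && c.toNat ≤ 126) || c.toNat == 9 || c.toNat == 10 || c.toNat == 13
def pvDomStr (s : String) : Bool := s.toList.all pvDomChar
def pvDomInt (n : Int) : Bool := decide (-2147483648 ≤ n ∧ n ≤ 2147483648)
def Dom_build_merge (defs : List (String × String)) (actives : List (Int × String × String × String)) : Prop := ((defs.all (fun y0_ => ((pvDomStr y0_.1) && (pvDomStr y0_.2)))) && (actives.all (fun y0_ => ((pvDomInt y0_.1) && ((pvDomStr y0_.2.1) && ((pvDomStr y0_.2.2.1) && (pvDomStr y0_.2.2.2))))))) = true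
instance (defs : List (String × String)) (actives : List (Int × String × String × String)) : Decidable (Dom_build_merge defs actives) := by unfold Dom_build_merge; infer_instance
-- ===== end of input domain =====

-- B does A's job in one pass (merged + counts dicts) instead of A's group-then-reduce; objective: simpler.
-- shared helper of both Python versions: tail.split("#", 1)[0].strip().strip('"').strip("'")
def scratch_value_tail (tail : String) : String :=
  PySem.Str.stripChars
    (PySem.Str.stripChars
      (PySem.Str.strip (((PySem.Str.splitMax? tail "#" 1).getD []).headD ""))
      "\"")
    "'"

-- ===== PORT A =====
def build_merge (defs : List (String × String)) (actives : List (Int × String × String × String)) : (List (String × String)) × List String :=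
  -- buckets: defaultdict(list); buckets[key].append(scratch_value_tail(tail))
  let buckets : PySem.Dict String (List String) :=
    actives.foldl (fun d t => d.modify t.2.2.1 [] (fun vs => vs ++ [scratch_value_tail t.2.2.2])) PySem.Dict.empty
  -- for key, vals in buckets.items(): dups.add on len>1; merged[key] = next((x for x in reversed(vals) if x), "") or ""
  let md : PySem.Dict String String × PySem.Set String :=
    buckets.items.foldl (fun md p =>
      let du := if p.2.length > 1 then PySem.Set.add md.2 p.1 else md.2
      let m := md.1.insert p.1 ((p.2.reverse.find? (fun x => x != "")).getD "")
      (m, du)) (PySem.Dict.empty, PySem.Set.empty)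
  -- for key, v in defs.items(): if not merged.get(key, "").strip() and v: merged[key] = v
  let merged : PySem.Dict String String :=
    defs.foldl (fun m p => if PySem.Str.strip (m.getD p.1 "") == "" && p.2 != "" then m.insert p.1 p.2 else m) md.1
  (merged.items, md.2)

-- ===== PORT B =====
def build_merge_alt (defs : List (String × String)) (actives : List (Int × String × String × String)) : (List (String × String)) × List String :=
  -- one pass: counts[key] = counts.get(key,0)+1; merged.setdefault(key, ""); if v: merged[key] = v
  let mc : PySem.Dict String String × PySem.Dict String Int :=
    actives.foldl (fun mc t =>
      (let v := scratch_value_tail t.2.2.2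
       let m1 := mc.1.setdefault t.2.2.1 ""
       if v != "" then m1.insert t.2.2.1 v else m1,
       mc.2.insert t.2.2.1 (mc.2.getD t.2.2.1 0 + 1))) (PySem.Dict.empty, PySem.Dict.empty)
  -- dups = {k for k, c in counts.items() if c > 1}
  let dups : PySem.Set String :=
    PySem.Set.ofList (mc.2.items.filterMap (fun p => if p.2 > 1 then some p.1 else none))
  -- for key, v in defs.items(): if not merged.get(key, "").strip() and v: merged[key] = v
  let merged : PySem.Dict String String :=
    defs.foldl (fun m p => if PySem.Str.strip (m.getD p.1 "") == "" && p.2 != "" then m.insert p.1 p.2 else m) mc.1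
  (merged.items, dups)

-- ===== PRECONDITION & SPEC =====
def Spec_build_merge (defs : List (String × String)) (actives : List (Int × String × String × String)) (out : (List (String × String)) × List String) : Prop := out = build_merge_alt defs actives
instance (defs : List (String × String)) (actives : List (Int × String × String × String)) (out : (List (String × String)) × List String) : Decidable (Spec_build_merge defs actives out) := by unfold Spec_build_merge; infer_instance

-- ===== CLAIM (what is proved, stated in full; the proofs are below) =====
def Claim_equal_build_merge : Prop := ∀ (defs : List (String × String)) (actives : List (Int × String × String × String)), Dom_build_merge defs actives → Spec_build_merge defs actives (build_merge defs actives)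

-- ===== LEMMAS AND PROOFS =====

def pvKey (t : Int × String × String × String) : String := t.2.2.1
def pvVal (t : Int × String × String × String) : String := scratch_value_tail t.2.2.2
def pvVals (k : String) (l : List (Int × String × String × String)) : List String :=
  (l.filter (fun t => pvKey t == k)).map pvVal
def pvCnt (k : String) (l : List (Int × String × String × String)) : Int :=
  ((l.filter (fun t => pvKey t == k)).length : Int)
def pvNew (seen : List String) : List (Int × String × String × String) → List String
  | [] => []
  | t :: r => if pvKey t ∈ seen then pvNew seen r else pvKey t :: pvNew (seen ++ [pvKey t]) r
def pvComb (w : String) (vs : List String) : String :=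
  vs.foldl (fun a v => if v == "" then a else v) w

theorem pvNew_not_mem (l : List (Int × String × String × String)) (seen : List String) (k : String)
    (h : k ∈ pvNew seen l) : k ∉ seen := by
  induction l generalizing seen with
  | nil => simp [pvNew] at h
  | cons t r ih =>
    rw [pvNew] at h
    split at h
    · exact ih seen h
    · rcases List.mem_cons.mp h with h1 | h1
      · subst h1; assumption
      · intro hk; exact (ih _ h1) (List.mem_append_left _ hk)

theorem pvNew_nodup (l : List (Int × String × String × String)) (seen : List String) :
    (pvNew seen l).Nodup := by
  induction l generalizing seen with
  | nil => simp [pvNew]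
  | cons t r ih =>
    rw [pvNew]; split
    · exact ih seen
    · refine List.nodup_cons.mpr ⟨fun hk => ?_, ih _⟩
      exact (pvNew_not_mem _ _ _ hk) (List.mem_append_right _ (List.mem_singleton.mpr rfl))

theorem pvVals_cons (k : String) (t : Int × String × String × String) (r : List (Int × String × String × String)) :
    pvVals k (t :: r) = if pvKey t == k then pvVal t :: pvVals k r else pvVals k r := by
  simp only [pvVals, List.filter]
  split <;> simp_all

theorem pvCnt_cons (k : String) (t : Int × String × String × String) (r : List (Int × String × String × String)) :
    pvCnt k (t :: r) = if pvKey t == k then pvCnt k r + 1 else pvCnt k r := by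
  simp only [pvCnt, List.filter]
  split <;> simp_all

theorem lastT_eq_pvComb (vs : List String) (w : String) :
    ((vs.reverse.find? (fun x => x != "")).getD w) = pvComb w vs := by
  induction vs generalizing w with
  | nil => simp [pvComb]
  | cons v r ih =>
    have hrev : (v :: r).reverse = r.reverse ++ [v] := by simp
    rw [hrev, List.find?_append, pvComb, List.foldl_cons]
    have key : pvComb (if (v == "") = true then w else v) r
        = List.foldl (fun a v => if (v == "") = true then a else v) (if (v == "") = true then w else v) r := rfl
    rcases hf : r.reverse.find? (fun x => x != "") with _ | x
    · have := ih (if (v == "") = true then w else v); rw [hf] at this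
      simp only [Option.getD_none] at this
      rw [← key, ← this]
      simp only [Option.none_or]
      by_cases hv : v = ""
      · simp [hv]
      · have hb : (v != "") = true := by simpa using hv
        simp [hb]
        exact fun h => absurd h hv
    · have := ih (if (v == "") = true then w else v); rw [hf] at this
      simp only [Option.getD_some] at this
      rw [← key, ← this]
      simp
theorem LA (l : List (Int × String × String × String)) (d : PySem.Dict String (List String))
    (hnd : d.keys.Nodup) :
    (l.foldl (fun d t => d.modify t.2.2.1 [] (fun vs => vs ++ [scratch_value_tail t.2.2.2])) d).items
      = d.items.map (fun p => (p.1, p.2 ++ pvVals p.1 l))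
        ++ (pvNew d.keys l).map (fun k => (k, pvVals k l)) := by
  induction l generalizing d with
  | nil => simp [pvVals, pvNew]
  | cons t r ih =>
    have hacc : (d.modify t.2.2.1 [] fun vs => vs ++ [scratch_value_tail t.2.2.2])
        = d.insert (pvKey t) (d.getD (pvKey t) [] ++ [pvVal t]) := rfl
    rw [List.foldl_cons, hacc]
    by_cases hc : d.contains (pvKey t) = true
    · -- existing key: insert replaces in place
      have hkeys : (d.insert (pvKey t) (d.getD (pvKey t) [] ++ [pvVal t])).keys = d.keys :=
        PySem.Dict.keys_insert_of_contains d _ hc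
      have hnd' : (d.insert (pvKey t) (d.getD (pvKey t) [] ++ [pvVal t])).keys.Nodup := by
        rw [hkeys]; exact hnd
      rw [ih _ hnd']
      rw [PySem.Dict.items_insert_of_contains d _ hc, hkeys]
      congr 1
      · rw [List.map_map]
        apply List.map_congr_left
        intro p hp
        by_cases hk : p.1 = pvKey t
        · have hb : (p.1 == pvKey t) = true := beq_iff_eq.mpr hk
          have hget : d.getD p.1 [] = p.2 := by
            rcases p with ⟨pk, pv⟩
            exact PySem.Dict.getD_of_mem_items d hp hnd []
          simp only [Function.comp, hb, if_pos]
          rw [pvVals_cons]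
          have hbt : (pvKey t == p.1) = true := beq_iff_eq.mpr hk.symm
          simp only [hbt, if_pos]
          rw [← hk, hget]
          simp
        · have hb : (p.1 == pvKey t) = false := by simpa using hk
          simp only [Function.comp, hb, if_neg, Bool.false_eq_true, not_false_iff]
          rw [pvVals_cons]
          have : (pvKey t == p.1) = false := by simpa using fun h => hk h.symm
          simp [this]
      · have hmem : pvKey t ∈ d.keys := (PySem.Dict.contains_iff_mem_keys d (pvKey t)).mp hc
        rw [pvNew, if_pos hmem]
        apply List.map_congr_left
        intro k hk
        have hne : k ≠ pvKey t := fun h => (pvNew_not_mem _ _ _ hk) (h ▸ hmem)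
        rw [pvVals_cons]
        have : (pvKey t == k) = false := by simpa using fun h => hne h.symm
        simp [this]
    · -- fresh key: insert appends
      have hc' : d.contains (pvKey t) = false := by simpa using hc
      have hget : d.getD (pvKey t) [] = [] := PySem.Dict.getD_of_not_contains d [] hc'
      have hitems : (d.insert (pvKey t) (d.getD (pvKey t) [] ++ [pvVal t])).items
          = d.items ++ [(pvKey t, [pvVal t])] := by
        rw [PySem.Dict.items_insert_of_not_contains d _ hc', hget]; simp
      have hkeys : (d.insert (pvKey t) (d.getD (pvKey t) [] ++ [pvVal t])).keys
          = d.keys ++ [pvKey t] := by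
        simp only [PySem.Dict.keys, hitems, List.map_append, List.map_cons, List.map_nil]
      have hmem : pvKey t ∉ d.keys := fun hmm => by
        rw [(PySem.Dict.contains_iff_mem_keys d (pvKey t)).mpr hmm] at hc'; cases hc'
      have hnd' : (d.insert (pvKey t) (d.getD (pvKey t) [] ++ [pvVal t])).keys.Nodup := by
        rw [hkeys]
        exact List.Nodup.append hnd (List.nodup_singleton _) (by simpa using hmem)
      rw [ih _ hnd', hitems, hkeys]
      rw [pvNew, if_neg hmem]
      simp only [List.map_append, List.map_cons, List.map_nil, List.append_assoc]
      congr 1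
      · apply List.map_congr_left
        intro p hp
        have hpk : p.1 ∈ d.keys := PySem.Dict.mem_keys_of_mem_items d hp
        have hne : p.1 ≠ pvKey t := fun h => hmem (h ▸ hpk)
        rw [pvVals_cons]
        have : (pvKey t == p.1) = false := by simpa using fun h => hne h.symm
        simp [this]
      · rw [pvVals_cons]
        have : (pvKey t == pvKey t) = true := beq_iff_eq.mpr rfl
        simp only [this, if_pos, List.cons_append, List.nil_append, List.singleton_append]
        congr 1
        apply List.map_congr_left
        intro k hk
        have hne : k ≠ pvKey t := fun h =>
          (pvNew_not_mem _ _ _ hk) (h ▸ List.mem_append_right _ (List.mem_singleton.mpr rfl))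
        rw [pvVals_cons]
        have : (pvKey t == k) = false := by simpa using fun h => hne h.symm
        simp [this]
theorem LC (l : List (Int × String × String × String)) (c : PySem.Dict String Int)
    (hnd : c.keys.Nodup) :
    (l.foldl (fun c t => c.insert t.2.2.1 (c.getD t.2.2.1 0 + 1)) c).items
      = c.items.map (fun p => (p.1, p.2 + pvCnt p.1 l))
        ++ (pvNew c.keys l).map (fun k => (k, pvCnt k l)) := by
  induction l generalizing c with
  | nil => simp [pvCnt, pvNew]
  | cons t r ih =>
    have hacc : (c.insert t.2.2.1 (c.getD t.2.2.1 0 + 1))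
        = c.insert (pvKey t) (c.getD (pvKey t) 0 + 1) := rfl
    rw [List.foldl_cons, hacc]
    by_cases hc : c.contains (pvKey t) = true
    · have hkeys : (c.insert (pvKey t) (c.getD (pvKey t) 0 + 1)).keys = c.keys :=
        PySem.Dict.keys_insert_of_contains c _ hc
      have hnd' : (c.insert (pvKey t) (c.getD (pvKey t) 0 + 1)).keys.Nodup := by
        rw [hkeys]; exact hnd
      rw [ih _ hnd']
      rw [PySem.Dict.items_insert_of_contains c _ hc, hkeys]
      congr 1
      · rw [List.map_map]
        apply List.map_congr_left
        intro p hp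
        by_cases hk : p.1 = pvKey t
        · have hb : (p.1 == pvKey t) = true := beq_iff_eq.mpr hk
          have hget : c.getD p.1 0 = p.2 := by
            rcases p with ⟨pk, pv⟩
            exact PySem.Dict.getD_of_mem_items c hp hnd 0
          have hbt : (pvKey t == p.1) = true := beq_iff_eq.mpr hk.symm
          simp only [Function.comp, hb, if_pos, pvCnt_cons, hbt]
          rw [← hk, hget]
          simp; omega
        · have hb : (p.1 == pvKey t) = false := by simpa using hk
          have hbt : (pvKey t == p.1) = false := by simpa using fun h => hk h.symm
          simp [Function.comp, hb, pvCnt_cons, hbt]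
      · have hmem : pvKey t ∈ c.keys := (PySem.Dict.contains_iff_mem_keys c (pvKey t)).mp hc
        rw [pvNew, if_pos hmem]
        apply List.map_congr_left
        intro k hk
        have hne : k ≠ pvKey t := fun h => (pvNew_not_mem _ _ _ hk) (h ▸ hmem)
        have : (pvKey t == k) = false := by simpa using fun h => hne h.symm
        simp [pvCnt_cons, this]
    · have hc' : c.contains (pvKey t) = false := by simpa using hc
      have hget : c.getD (pvKey t) 0 = 0 := PySem.Dict.getD_of_not_contains c 0 hc'
      have hitems : (c.insert (pvKey t) (c.getD (pvKey t) 0 + 1)).items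
          = c.items ++ [(pvKey t, 1)] := by
        rw [PySem.Dict.items_insert_of_not_contains c _ hc', hget]; norm_num
      have hkeys : (c.insert (pvKey t) (c.getD (pvKey t) 0 + 1)).keys
          = c.keys ++ [pvKey t] := by
        simp only [PySem.Dict.keys, hitems, List.map_append, List.map_cons, List.map_nil]
      have hmem : pvKey t ∉ c.keys := fun hmm => by
        rw [(PySem.Dict.contains_iff_mem_keys c (pvKey t)).mpr hmm] at hc'; cases hc'
      have hnd' : (c.insert (pvKey t) (c.getD (pvKey t) 0 + 1)).keys.Nodup := by
        rw [hkeys]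
        exact List.Nodup.append hnd (List.nodup_singleton _) (by simpa using hmem)
      rw [ih _ hnd', hitems, hkeys]
      rw [pvNew, if_neg hmem]
      simp only [List.map_append, List.map_cons, List.map_nil, List.append_assoc]
      congr 1
      · apply List.map_congr_left
        intro p hp
        have hpk : p.1 ∈ c.keys := PySem.Dict.mem_keys_of_mem_items c hp
        have hne : p.1 ≠ pvKey t := fun h => hmem (h ▸ hpk)
        have : (pvKey t == p.1) = false := by simpa using fun h => hne h.symm
        simp [pvCnt_cons, this]
      · have hbt : (pvKey t == pvKey t) = true := beq_iff_eq.mpr rfl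
        simp only [pvCnt_cons, hbt, if_pos, List.cons_append, List.nil_append]
        congr 1
        · simp [pvCnt]; omega
        · apply List.map_congr_left
          intro k hk
          have hne : k ≠ pvKey t := fun h =>
            (pvNew_not_mem _ _ _ hk) (h ▸ List.mem_append_right _ (List.mem_singleton.mpr rfl))
          have : (pvKey t == k) = false := by simpa using fun h => hne h.symm
          simp [pvCnt_cons, this]
theorem pvComb_cons (w v : String) (vs : List String) :
    pvComb w (v :: vs) = pvComb (if v == "" then w else v) vs := rfl

theorem LB (l : List (Int × String × String × String)) (m : PySem.Dict String String)
    (hnd : m.keys.Nodup) :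
    (l.foldl (fun m t =>
        let v := scratch_value_tail t.2.2.2
        let m1 := m.setdefault t.2.2.1 ""
        if v != "" then m1.insert t.2.2.1 v else m1) m).items
      = m.items.map (fun p => (p.1, pvComb p.2 (pvVals p.1 l)))
        ++ (pvNew m.keys l).map (fun k => (k, pvComb "" (pvVals k l))) := by
  induction l generalizing m with
  | nil => simp [pvComb, pvVals, pvNew]
  | cons t r ih =>
    rw [List.foldl_cons]
    show (List.foldl _
        (if (scratch_value_tail t.2.2.2 != "") = true
          then (m.setdefault t.2.2.1 "").insert t.2.2.1 (scratch_value_tail t.2.2.2)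
          else m.setdefault t.2.2.1 "") r).items = _
    by_cases hc : m.contains (pvKey t) = true
    · have hsd : m.setdefault t.2.2.1 "" = m := PySem.Dict.setdefault_of_contains m "" hc
      have hmem : pvKey t ∈ m.keys := (PySem.Dict.contains_iff_mem_keys m (pvKey t)).mp hc
      have hn : pvNew m.keys (t :: r) = pvNew m.keys r := by rw [pvNew, if_pos hmem]
      have e2 : List.map (fun k => (k, pvComb "" (pvVals k (t :: r)))) (pvNew m.keys r)
          = List.map (fun k => (k, pvComb "" (pvVals k r))) (pvNew m.keys r) := by
        apply List.map_congr_left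
        intro k hk
        have hne : k ≠ pvKey t := fun h => (pvNew_not_mem _ _ _ hk) (h ▸ hmem)
        have hb1 : (pvKey t == k) = false := by simpa using fun h => hne h.symm
        simp [pvVals_cons, hb1]
      by_cases hv : pvVal t = ""
      · have hb : (scratch_value_tail t.2.2.2 != "") = false := by
          have h0 : pvVal t = scratch_value_tail t.2.2.2 := rfl
          rw [h0] at hv; simp [hv]
        rw [hb, if_neg (by simp), hsd, ih _ hnd]
        have e1 : List.map (fun p => (p.1, pvComb p.2 (pvVals p.1 (t :: r)))) m.items
            = List.map (fun p => (p.1, pvComb p.2 (pvVals p.1 r))) m.items := by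
          apply List.map_congr_left
          intro p hp
          rw [pvVals_cons]
          by_cases hk : pvKey t = p.1
          · have hb1 : (pvKey t == p.1) = true := beq_iff_eq.mpr hk
            have hb2 : (pvVal t == "") = true := beq_iff_eq.mpr hv
            simp [hb1, hb2, pvComb_cons]
          · have hb1 : (pvKey t == p.1) = false := by simpa using hk
            simp [hb1]
        rw [hn, e1, e2]
      · have hb : (scratch_value_tail t.2.2.2 != "") = true := by
          have h0 : pvVal t = scratch_value_tail t.2.2.2 := rfl
          rw [← h0]; simpa using hv
        rw [hb, if_pos rfl, hsd]
        have hacc : m.insert t.2.2.1 (scratch_value_tail t.2.2.2) = m.insert (pvKey t) (pvVal t) := rfl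
        rw [hacc]
        have hkeys : (m.insert (pvKey t) (pvVal t)).keys = m.keys :=
          PySem.Dict.keys_insert_of_contains m _ hc
        have hnd' : (m.insert (pvKey t) (pvVal t)).keys.Nodup := by rw [hkeys]; exact hnd
        rw [ih _ hnd', PySem.Dict.items_insert_of_contains m _ hc, hkeys, List.map_map]
        have e1 : List.map (fun p => (p.1, pvComb p.2 (pvVals p.1 (t :: r)))) m.items
            = List.map ((fun p => (p.1, pvComb p.2 (pvVals p.1 r))) ∘
                (fun p => if (p.1 == pvKey t) = true then (pvKey t, pvVal t) else p)) m.items := by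
          apply List.map_congr_left
          intro p hp
          simp only [Function.comp]
          rw [pvVals_cons]
          by_cases hk : pvKey t = p.1
          · have hb1 : (pvKey t == p.1) = true := beq_iff_eq.mpr hk
            have hb2 : (p.1 == pvKey t) = true := beq_iff_eq.mpr hk.symm
            have hbe : (pvVal t == "") = false := by simpa using hv
            simp only [hb1, if_true, hb2, pvComb_cons, hbe]
            rw [← hk]
            simp
          · have hb1 : (pvKey t == p.1) = false := by simpa using hk
            have hb2 : (p.1 == pvKey t) = false := by simpa using fun h => hk h.symm
            simp [hb1, hb2]
        rw [hn, e1, e2]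
    · have hc' : m.contains (pvKey t) = false := by simpa using hc
      have hmem : pvKey t ∉ m.keys := fun hmm => by
        rw [(PySem.Dict.contains_iff_mem_keys m (pvKey t)).mpr hmm] at hc'; cases hc'
      have hsd : m.setdefault t.2.2.1 "" = m.insert (pvKey t) "" :=
        PySem.Dict.setdefault_of_not_contains m "" hc'
      have hafter : (if (scratch_value_tail t.2.2.2 != "") = true
          then (m.setdefault t.2.2.1 "").insert t.2.2.1 (scratch_value_tail t.2.2.2)
          else m.setdefault t.2.2.1 "")
          = m.insert (pvKey t) (if (pvVal t == "") = true then "" else pvVal t) := by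
        by_cases hv : pvVal t = ""
        · have hb : (scratch_value_tail t.2.2.2 != "") = false := by
            have h0 : pvVal t = scratch_value_tail t.2.2.2 := rfl
            rw [h0] at hv; simp [hv]
          have hbe : (pvVal t == "") = true := beq_iff_eq.mpr hv
          rw [hb, if_neg (by simp), hsd, hbe, if_pos rfl]
        · have hb : (scratch_value_tail t.2.2.2 != "") = true := by
            have h0 : pvVal t = scratch_value_tail t.2.2.2 := rfl
            rw [← h0]; simpa using hv
          have hbe : (pvVal t == "") = false := by simpa using hv
          rw [hb, if_pos rfl, hsd, hbe]
          have hstep : ((m.insert (pvKey t) "").insert t.2.2.1 (scratch_value_tail t.2.2.2))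
              = ((m.insert (pvKey t) "").insert (pvKey t) (pvVal t)) := rfl
          rw [hstep, PySem.Dict.insert_insert_self]
          simp
      rw [hafter]
      have hitems : (m.insert (pvKey t) (if (pvVal t == "") = true then "" else pvVal t)).items
          = m.items ++ [(pvKey t, if (pvVal t == "") = true then "" else pvVal t)] :=
        PySem.Dict.items_insert_of_not_contains m _ hc'
      have hkeys : (m.insert (pvKey t) (if (pvVal t == "") = true then "" else pvVal t)).keys
          = m.keys ++ [pvKey t] := by
        simp only [PySem.Dict.keys, hitems, List.map_append, List.map_cons, List.map_nil]
      have hnd' : (m.insert (pvKey t) (if (pvVal t == "") = true then "" else pvVal t)).keys.Nodup := by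
        rw [hkeys]
        exact List.Nodup.append hnd (List.nodup_singleton _) (by simpa using hmem)
      rw [ih _ hnd', hitems, hkeys, List.map_append]
      have hn : pvNew m.keys (t :: r) = pvKey t :: pvNew (m.keys ++ [pvKey t]) r := by
        rw [pvNew, if_neg hmem]
      rw [hn]
      have e1 : List.map (fun p => (p.1, pvComb p.2 (pvVals p.1 (t :: r)))) m.items
          = List.map (fun p => (p.1, pvComb p.2 (pvVals p.1 r))) m.items := by
        apply List.map_congr_left
        intro p hp
        have hpk : p.1 ∈ m.keys := PySem.Dict.mem_keys_of_mem_items m hp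
        have hne : p.1 ≠ pvKey t := fun h => hmem (h ▸ hpk)
        have hb1 : (pvKey t == p.1) = false := by simpa using fun h => hne h.symm
        simp [pvVals_cons, hb1]
      have e2 : List.map (fun k => (k, pvComb "" (pvVals k (t :: r)))) (pvNew (m.keys ++ [pvKey t]) r)
          = List.map (fun k => (k, pvComb "" (pvVals k r))) (pvNew (m.keys ++ [pvKey t]) r) := by
        apply List.map_congr_left
        intro k hk
        have hne : k ≠ pvKey t := fun h =>
          (pvNew_not_mem _ _ _ hk) (h ▸ List.mem_append_right _ (List.mem_singleton.mpr rfl))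
        have hb1 : (pvKey t == k) = false := by simpa using fun h => hne h.symm
        simp [pvVals_cons, hb1]
      have e3 : pvComb "" (pvVals (pvKey t) (t :: r))
          = pvComb (if (pvVal t == "") = true then "" else pvVal t) (pvVals (pvKey t) r) := by
        have hbt : (pvKey t == pvKey t) = true := beq_iff_eq.mpr rfl
        rw [pvVals_cons, if_pos hbt, pvComb_cons]
      rw [e1]
      simp only [List.map_cons, List.map_nil, e2, e3, List.append_assoc, List.nil_append,
        List.cons_append]
theorem setAdd_of_not_mem (du : List String) (x : String) (h : x ∉ du) :
    PySem.Set.add du x = du ++ [x] := by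
  simp [PySem.Set.add]
  exact h

theorem LP (its : List (String × List String)) (m : PySem.Dict String String) (du : List String)
    (hm : ∀ p ∈ its, m.contains p.1 = false) (hdu : ∀ p ∈ its, p.1 ∉ du)
    (hnd : (its.map (·.1)).Nodup) :
    its.foldl (fun md p =>
        let du := if p.2.length > 1 then PySem.Set.add md.2 p.1 else md.2
        let mm := md.1.insert p.1 ((p.2.reverse.find? (fun x => x != "")).getD "")
        (mm, du)) (m, du)
      = (⟨m.items ++ its.map (fun p => (p.1, (p.2.reverse.find? (fun x => x != "")).getD ""))⟩,
         du ++ (its.filter (fun p => decide (p.2.length > 1))).map (·.1)) := by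
  induction its generalizing m du with
  | nil =>
    simp only [List.foldl_nil, List.map_nil, List.append_nil, List.filter_nil]
  | cons p its ih =>
    rw [List.foldl_cons]
    show its.foldl _
        (m.insert p.1 ((p.2.reverse.find? (fun x => x != "")).getD ""),
         if p.2.length > 1 then PySem.Set.add du p.1 else du) = _
    have hpm : m.contains p.1 = false := hm p (List.mem_cons_self)
    have hpdu : p.1 ∉ du := hdu p (List.mem_cons_self)
    have hadd : (if p.2.length > 1 then PySem.Set.add du p.1 else du)
        = du ++ (if p.2.length > 1 then [p.1] else []) := by
      split
      · exact setAdd_of_not_mem du p.1 hpdu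
      · simp
    rw [hadd]
    have hnd' : (its.map (·.1)).Nodup := (List.nodup_cons.mp hnd).2
    have hp1 : p.1 ∉ its.map (·.1) := (List.nodup_cons.mp hnd).1
    have hm' : ∀ q ∈ its, (m.insert p.1 ((p.2.reverse.find? (fun x => x != "")).getD "")).contains q.1 = false := by
      intro q hq
      have hne : q.1 ≠ p.1 := fun h => hp1 (h ▸ List.mem_map_of_mem hq)
      rw [PySem.Dict.contains_insert]
      have : (q.1 == p.1) = false := by simpa using hne
      rw [this, Bool.false_or]
      exact hm q (List.mem_cons_of_mem _ hq)
    have hdu' : ∀ q ∈ its, q.1 ∉ du ++ (if p.2.length > 1 then [p.1] else []) := by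
      intro q hq hqmem
      rcases List.mem_append.mp hqmem with h1 | h1
      · exact hdu q (List.mem_cons_of_mem _ hq) h1
      · have hne : q.1 ≠ p.1 := fun h => hp1 (h ▸ List.mem_map_of_mem hq)
        split at h1 <;> simp at h1
        exact hne h1
    rw [ih _ _ hm' hdu' hnd']
    have hitems : (m.insert p.1 ((p.2.reverse.find? (fun x => x != "")).getD "")).items
        = m.items ++ [(p.1, (p.2.reverse.find? (fun x => x != "")).getD "")] :=
      PySem.Dict.items_insert_of_not_contains m _ hpm
    rw [hitems]
    refine Prod.ext (PySem.Dict.ext ?_) ?_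
    · simp
    · rw [List.filter_cons]
      by_cases hlen : 1 < p.2.length
      · simp [hlen]
      · simp [hlen]
theorem foldl_prod {τ α β : Type} (l : List τ) (f : α → τ → α) (g : β → τ → β) (a : α) (b : β) :
    l.foldl (fun p t => (f p.1 t, g p.2 t)) (a, b) = (l.foldl f a, l.foldl g b) := by
  induction l generalizing a b with
  | nil => rfl
  | cons t r ih => simpa using ih (f a t) (g b t)

theorem filterMap_guard (l : List String) (P : String → Prop) [DecidablePred P] :
    l.filterMap (fun k => if P k then some k else none) = l.filter (fun k => decide (P k)) := by
  induction l with
  | nil => rfl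
  | cons x r ih =>
    rw [List.filterMap_cons, List.filter_cons]
    by_cases h : P x <;> simp [h, ih]

theorem pv_main (defs : List (String × String)) (actives : List (Int × String × String × String)) :
    build_merge defs actives = build_merge_alt defs actives := by
  -- name the intermediate states of port A
  have hndN : (pvNew [] actives).Nodup := pvNew_nodup actives []
  have hBuckets : (actives.foldl (fun d t => d.modify t.2.2.1 [] (fun vs => vs ++ [scratch_value_tail t.2.2.2]))
      (PySem.Dict.empty : PySem.Dict String (List String))).items
      = (pvNew [] actives).map (fun k => (k, pvVals k actives)) := by
    rw [LA actives PySem.Dict.empty (by simp [PySem.Dict.keys_empty])]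
    have hie : (PySem.Dict.empty : PySem.Dict String (List String)).items = [] := rfl
    simp [PySem.Dict.keys_empty, hie]
  -- phase 2 of A
  have hfst : ((pvNew [] actives).map (fun k => (k, pvVals k actives))).map (·.1) = pvNew [] actives := by
    rw [List.map_map]
    have hc : ((fun x : String × List String => x.1) ∘ (fun k : String => (k, pvVals k actives)))
        = fun k : String => k := rfl
    rw [hc, List.map_id']
  have hMD := LP ((pvNew [] actives).map (fun k => (k, pvVals k actives)))
      PySem.Dict.empty []
      (by intro p _; exact PySem.Dict.contains_empty p.1)
      (by intro p _ h; exact (List.not_mem_nil) h)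
      (by rw [hfst]; exact hndN)
  -- B side splits into two independent folds
  have hSplit := foldl_prod actives
      (fun m (t : Int × String × String × String) =>
        let v := scratch_value_tail t.2.2.2
        let m1 := m.setdefault t.2.2.1 ""
        if v != "" then m1.insert t.2.2.1 v else m1)
      (fun c (t : Int × String × String × String) => c.insert t.2.2.1 (c.getD t.2.2.1 0 + 1))
      (PySem.Dict.empty : PySem.Dict String String)
      (PySem.Dict.empty : PySem.Dict String Int)
  have hMB : (actives.foldl (fun m t =>
        let v := scratch_value_tail t.2.2.2
        let m1 := m.setdefault t.2.2.1 ""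
        if v != "" then m1.insert t.2.2.1 v else m1) (PySem.Dict.empty : PySem.Dict String String)).items
      = (pvNew [] actives).map (fun k => (k, pvComb "" (pvVals k actives))) := by
    rw [LB actives PySem.Dict.empty (by simp [PySem.Dict.keys_empty])]
    have hie : (PySem.Dict.empty : PySem.Dict String String).items = [] := rfl
    simp [PySem.Dict.keys_empty, hie]
  have hCB : (actives.foldl (fun c t => c.insert t.2.2.1 (c.getD t.2.2.1 0 + 1))
      (PySem.Dict.empty : PySem.Dict String Int)).items
      = (pvNew [] actives).map (fun k => (k, pvCnt k actives)) := by
    rw [LC actives PySem.Dict.empty (by simp [PySem.Dict.keys_empty])]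
    have hie : (PySem.Dict.empty : PySem.Dict String Int).items = [] := rfl
    simp [PySem.Dict.keys_empty, hie]
  -- the two merged dicts agree
  have hMergedEq :
      (((pvNew [] actives).map (fun k => (k, pvVals k actives))).foldl (fun md p =>
          let du := if p.2.length > 1 then PySem.Set.add md.2 p.1 else md.2
          let mm := md.1.insert p.1 ((p.2.reverse.find? (fun x => x != "")).getD "")
          (mm, du)) (PySem.Dict.empty, PySem.Set.empty)).1
      = actives.foldl (fun m t =>
          let v := scratch_value_tail t.2.2.2
          let m1 := m.setdefault t.2.2.1 ""
          if v != "" then m1.insert t.2.2.1 v else m1) (PySem.Dict.empty : PySem.Dict String String) := by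
    apply PySem.Dict.ext
    rw [hMB]
    have h1 : (((pvNew [] actives).map (fun k => (k, pvVals k actives))).foldl (fun md p =>
          let du := if p.2.length > 1 then PySem.Set.add md.2 p.1 else md.2
          let mm := md.1.insert p.1 ((p.2.reverse.find? (fun x => x != "")).getD "")
          (mm, du)) (PySem.Dict.empty, PySem.Set.empty)).1.items
        = [] ++ ((pvNew [] actives).map (fun k => (k, pvVals k actives))).map
            (fun p => (p.1, (p.2.reverse.find? (fun x => x != "")).getD "")) :=
      congrArg (fun z : PySem.Dict String String × PySem.Set String => z.1.items) hMD
    rw [h1, List.nil_append, List.map_map]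
    apply List.map_congr_left
    intro k _
    simp only [Function.comp]
    rw [lastT_eq_pvComb]
  -- the two duplicate lists agree
  have hDupsEq :
      (((pvNew [] actives).map (fun k => (k, pvVals k actives))).foldl (fun md p =>
          let du := if p.2.length > 1 then PySem.Set.add md.2 p.1 else md.2
          let mm := md.1.insert p.1 ((p.2.reverse.find? (fun x => x != "")).getD "")
          (mm, du)) (PySem.Dict.empty, PySem.Set.empty)).2
      = PySem.Set.ofList ((actives.foldl (fun c t => c.insert t.2.2.1 (c.getD t.2.2.1 0 + 1))
          (PySem.Dict.empty : PySem.Dict String Int)).items.filterMap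
            (fun p => if p.2 > 1 then some p.1 else none)) := by
    have h2 : (((pvNew [] actives).map (fun k => (k, pvVals k actives))).foldl (fun md p =>
          let du := if p.2.length > 1 then PySem.Set.add md.2 p.1 else md.2
          let mm := md.1.insert p.1 ((p.2.reverse.find? (fun x => x != "")).getD "")
          (mm, du)) (PySem.Dict.empty, PySem.Set.empty)).2
        = [] ++ (((pvNew [] actives).map (fun k => (k, pvVals k actives))).filter
            (fun p => decide (p.2.length > 1))).map (·.1) :=
      congrArg (fun z : PySem.Dict String String × PySem.Set String => z.2) hMD
    rw [h2, hCB]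
    rw [List.nil_append, List.filter_map, List.map_map, List.filterMap_map]
    have hg : ((fun p : String × Int => if p.2 > 1 then some p.1 else none) ∘
        (fun k => (k, pvCnt k actives))) = fun k => if pvCnt k actives > 1 then some k else none := rfl
    rw [hg, filterMap_guard]
    rw [PySem.Set.ofList_eq_self_of_nodup _ (List.Nodup.filter _ hndN)]
    have hid : ((fun p : String × List String => p.1) ∘ (fun k => (k, pvVals k actives)))
        = fun k => k := rfl
    rw [hid, List.map_id']
    apply List.filter_congr
    intro k _
    simp only [Function.comp, pvVals, List.length_map]
    by_cases h : ((actives.filter (fun t => pvKey t == k)).length > 1)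
    · have h2 : pvCnt k actives > 1 := by simp only [pvCnt]; exact_mod_cast h
      simp [h, h2]
    · have h2 : ¬ pvCnt k actives > 1 := by simp only [pvCnt]; exact_mod_cast h
      simp [h, h2]
  -- assemble
  have hB : build_merge_alt defs actives = (
      (defs.foldl (fun m p => if PySem.Str.strip (m.getD p.1 "") == "" && p.2 != "" then m.insert p.1 p.2 else m)
        ((actives.foldl (fun mc t =>
            (let v := scratch_value_tail t.2.2.2
             let m1 := mc.1.setdefault t.2.2.1 ""
             if v != "" then m1.insert t.2.2.1 v else m1,
             mc.2.insert t.2.2.1 (mc.2.getD t.2.2.1 0 + 1)))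
          ((PySem.Dict.empty, PySem.Dict.empty) :
            PySem.Dict String String × PySem.Dict String Int)).1)).items,
      PySem.Set.ofList (((actives.foldl (fun mc t =>
            (let v := scratch_value_tail t.2.2.2
             let m1 := mc.1.setdefault t.2.2.1 ""
             if v != "" then m1.insert t.2.2.1 v else m1,
             mc.2.insert t.2.2.1 (mc.2.getD t.2.2.1 0 + 1)))
          ((PySem.Dict.empty, PySem.Dict.empty) :
            PySem.Dict String String × PySem.Dict String Int)).2).items.filterMap
        (fun p => if p.2 > 1 then some p.1 else none))) := by
    unfold build_merge_alt
    rfl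
  have hA : build_merge defs actives = (
      (defs.foldl (fun m p => if PySem.Str.strip (m.getD p.1 "") == "" && p.2 != "" then m.insert p.1 p.2 else m)
        ((((actives.foldl (fun d t => d.modify t.2.2.1 [] (fun vs => vs ++ [scratch_value_tail t.2.2.2]))
            (PySem.Dict.empty : PySem.Dict String (List String))).items).foldl (fun md p =>
              let du := if p.2.length > 1 then PySem.Set.add md.2 p.1 else md.2
              let mm := md.1.insert p.1 ((p.2.reverse.find? (fun x => x != "")).getD "")
              (mm, du)) (PySem.Dict.empty, PySem.Set.empty)).1)).items,
      (((actives.foldl (fun d t => d.modify t.2.2.1 [] (fun vs => vs ++ [scratch_value_tail t.2.2.2]))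
            (PySem.Dict.empty : PySem.Dict String (List String))).items).foldl (fun md p =>
              let du := if p.2.length > 1 then PySem.Set.add md.2 p.1 else md.2
              let mm := md.1.insert p.1 ((p.2.reverse.find? (fun x => x != "")).getD "")
              (mm, du)) (PySem.Dict.empty, PySem.Set.empty)).2) := rfl
  rw [hA, hB, hSplit, hBuckets, hMergedEq, hDupsEq]

-- ===== VERDICT (by name: the statement is the Claim_ definition above) =====
theorem build_merge_spec : Claim_equal_build_merge := by
  intro defs actives _
  unfold Spec_build_merge
  exact pv_main defs actives
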